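-- pv_equiv track=rewrite | github.com/Romildo22/trabalho3_grafos_python | Grafos/Matriz.py | TeoremaOre
-- ===== SOURCE A (Python) =====
-- def calcularGraus(matriz):
--     graus = []
--     for v in range(len(matriz)):
--         graus.append(0)
--         for a in range(len(matriz[v])):
--             if(matriz[v][a] == 1):
--                 graus[v] += 1
--     return graus
--
-- def TeoremaOre(matriz, graus):
--     graus = calcularGraus(matriz)
--     if(len(matriz) < 3):
--         return False
--
--     for v1 in range(len(graus)-1):
--
--         for v2 in range(v1+1, len(matriz[v1])):
--             if(graus[v1] + graus[v2] < len(matriz)):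
--                 return False
--     return True
-- ===== SOURCE B (Python) =====
-- def TeoremaOre(matriz, graus):
--     # Ore's condition: every pair of vertices has degree sum >= n.
--     # Equivalent to: the two smallest degrees sum to >= n.
--     n = len(matriz)
--     if n < 3:
--         return False
--     m1 = m2 = None  # smallest and second-smallest degree seen so far
--     for row in matriz:
--         d = row.count(1)
--         if m1 is None or d < m1:
--             m1, m2 = d, m1
--         elif m2 is None or d < m2:
--             m2 = d
--     return m1 + m2 >= n
-- ===== Notes on version B (the rewrite author's own statement) =====
-- stated objective: alternative
-- what changed: Replaces A's all-pairs double loop over the degree list by a single pass that tracks the two smallest degrees and compares their sum with n; Pre_ restricts inputs with >=3 rows to square matrices (the natural domain of an adjacency matrix), since on ragged matrices A's inner bound len(matriz[v1]) accidentally skips pairs or raises IndexError.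
-- outside the precondition, e.g. on TeoremaOre([[0], [0], [0]], []): A returns True, B returns False; on TeoremaOre([[1, 1, 1, 1], [1, 1, 1, 1], [1, 1, 1, 1]], []): A raises IndexError, B returns True
import Mathlib
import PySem

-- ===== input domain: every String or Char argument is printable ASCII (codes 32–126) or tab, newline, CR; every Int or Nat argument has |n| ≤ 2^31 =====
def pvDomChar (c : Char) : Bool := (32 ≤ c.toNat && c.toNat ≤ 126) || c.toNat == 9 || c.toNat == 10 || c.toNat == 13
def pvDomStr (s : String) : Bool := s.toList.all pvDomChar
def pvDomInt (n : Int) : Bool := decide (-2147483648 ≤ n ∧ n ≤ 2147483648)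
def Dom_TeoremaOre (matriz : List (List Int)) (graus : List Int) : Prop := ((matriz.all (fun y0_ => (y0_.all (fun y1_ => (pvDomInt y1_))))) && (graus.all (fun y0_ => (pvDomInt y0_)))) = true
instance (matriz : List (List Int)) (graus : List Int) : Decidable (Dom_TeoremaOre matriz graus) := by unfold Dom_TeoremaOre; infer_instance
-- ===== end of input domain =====

-- B replaces A's all-pairs scan of the degree list by a single pass that tracks the two smallest
-- degrees and compares their sum with n; return value only (neither version mutates its arguments).

-- ===== PORT A =====
-- inner loop of calcularGraus: iterate the row, count entries equal to 1
def pvRowDeg (row : List Int) : Int :=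
  row.foldl (fun acc a => if a == 1 then acc + 1 else acc) 0

def calcularGraus (matriz : List (List Int)) : List Int :=
  matriz.map pvRowDeg

-- inner loop over v2 (graus[v2]: on Pre_ the index is always in range, so the default is unused)
def oreInner (graus : List Int) (n g1 : Int) : List Int → Bool
  | [] => true
  | v2 :: rest =>
      if g1 + PySem.List.pyGetD graus v2 0 < n then false
      else oreInner graus n g1 rest

-- outer loop over v1, with the early `return False` propagated
def oreOuter (matriz : List (List Int)) (graus : List Int) (n : Int) : List Int → Bool
  | [] => true
  | v1 :: rest =>
      if oreInner graus n (PySem.List.pyGetD graus v1 0)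
          (PySem.List.pyRange (v1 + 1) (((PySem.List.pyGetD matriz v1 []).length : Int)) 1)
      then oreOuter matriz graus n rest
      else false

def TeoremaOre (matriz : List (List Int)) (graus : List Int) : Bool :=
  -- graus = calcularGraus(matriz) is inlined (it rebinds the parameter)
  if matriz.length < 3 then false
  else oreOuter matriz (calcularGraus matriz) (matriz.length : Int)
         (PySem.List.pyRange 0 (((calcularGraus matriz).length : Int) - 1) 1)

-- ===== PORT B =====
-- one loop-body step: m1/m2 are the smallest and second-smallest degree seen so far (None = unset)
def pvStep (st : Option Int × Option Int) (d : Int) : Option Int × Option Int :=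
  match st with
  | (none, m2) => (some d, m2)
  | (some m1, m2) =>
      if d < m1 then (some d, some m1)
      else
        match m2 with
        | none => (some m1, some d)
        | some b => if d < b then (some m1, some d) else (some m1, some b)

def TeoremaOre_alt (matriz : List (List Int)) (graus : List Int) : Bool :=
  if matriz.length < 3 then false
  else
    -- n ≥ 3 rows, so m1 and m2 are both set here; getD 0 mirrors Python's unreachable None case
    match matriz.foldl (fun st row => pvStep st ((PySem.List.count row 1 : Nat) : Int)) (none, none) with
    | (m1, m2) => decide ((matriz.length : Int) ≤ m1.getD 0 + m2.getD 0)

-- ===== PRECONDITION & SPEC =====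
-- Pre_ restricts ≥3-row inputs to SQUARE matrices — the natural domain of an adjacency matrix:
-- on ragged matrices A's inner bound len(matriz[v1]) accidentally skips pairs (short rows) or
-- raises IndexError on graus[v2] (long rows).
def Pre_TeoremaOre (matriz : List (List Int)) (graus : List Int) : Prop :=
  matriz.length < 3 ∨ ∀ row ∈ matriz, row.length = matriz.length
instance (matriz : List (List Int)) (graus : List Int) : Decidable (Pre_TeoremaOre matriz graus) := by
  unfold Pre_TeoremaOre; infer_instance

def pvWitness_TeoremaOre : List (List Int) × List Int := ([[0, 1, 1], [1, 0, 1], [1, 1, 0]], [])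

def Spec_TeoremaOre (matriz : List (List Int)) (graus : List Int) (out : Bool) : Prop := out = TeoremaOre_alt matriz graus
instance (matriz : List (List Int)) (graus : List Int) (out : Bool) : Decidable (Spec_TeoremaOre matriz graus out) := by unfold Spec_TeoremaOre; infer_instance

-- ===== CLAIM (what is proved, stated in full; the proofs are below) =====
def Claim_equal_TeoremaOre : Prop := ∀ (matriz : List (List Int)) (graus : List Int), Dom_TeoremaOre matriz graus → Pre_TeoremaOre matriz graus → Spec_TeoremaOre matriz graus (TeoremaOre matriz graus)

-- ===== LEMMAS AND PROOFS =====

def pvDegs (matriz : List (List Int)) : List Int :=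
  matriz.map (fun row => ((PySem.List.count row 1 : Nat) : Int))

lemma calcularGraus_eq (matriz : List (List Int)) : calcularGraus matriz = pvDegs matriz := by
  unfold calcularGraus pvDegs
  refine List.map_congr_left ?_
  intro row _
  unfold pvRowDeg
  rw [PySem.List.foldl_count_if (fun a => a == 1) row 0]
  simp [PySem.List.count, List.count]

lemma pvDegs_length (matriz : List (List Int)) : (pvDegs matriz).length = matriz.length := by
  simp [pvDegs]

lemma oreInner_eq_all (graus : List Int) (n g1 : Int) (l : List Int) :
    oreInner graus n g1 l
      = l.all (fun v2 => !decide (g1 + PySem.List.pyGetD graus v2 0 < n)) := by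
  induction l with
  | nil => rfl
  | cons v2 rest ih =>
      by_cases h : g1 + PySem.List.pyGetD graus v2 0 < n <;>
        simp [oreInner, h, ih]

lemma oreOuter_eq_all (matriz : List (List Int)) (graus : List Int) (n : Int) (l : List Int) :
    oreOuter matriz graus n l
      = l.all (fun v1 => oreInner graus n (PySem.List.pyGetD graus v1 0)
          (PySem.List.pyRange (v1 + 1) (((PySem.List.pyGetD matriz v1 []).length : Int)) 1)) := by
  induction l with
  | nil => rfl
  | cons v1 rest ih =>
      by_cases h : oreInner graus n (PySem.List.pyGetD graus v1 0)
          (PySem.List.pyRange (v1 + 1) (((PySem.List.pyGetD matriz v1 []).length : Int)) 1) <;>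
        simp [oreOuter, h, ih]

-- A's loop decides the strict all-pairs condition (Int-indexed)
lemma ore_loop_iff (matriz : List (List Int)) (n : Int) :
    (oreOuter matriz (pvDegs matriz) n (PySem.List.pyRange 0 (n - 1) 1) = true)
      ↔ ∀ v1 : Int, 0 ≤ v1 → v1 < n - 1 →
          ∀ v2 : Int, v1 + 1 ≤ v2 → v2 < ((PySem.List.pyGetD matriz v1 []).length : Int) →
            n ≤ PySem.List.pyGetD (pvDegs matriz) v1 0 + PySem.List.pyGetD (pvDegs matriz) v2 0 := by
  rw [oreOuter_eq_all]
  simp only [List.all_eq_true, oreInner_eq_all, Bool.not_eq_true', decide_eq_false_iff_not,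
    not_lt, PySem.List.mem_pyRange_one]
  constructor
  · intro h v1 h0 h1 v2 h2 h3
    exact h v1 ⟨h0, h1⟩ v2 ⟨h2, h3⟩
  · intro h v1 hv1 v2 hv2
    exact h v1 hv1.1 hv1.2 v2 hv2.1 hv2.2

-- invariant of B's fold: the state holds the two smallest elements processed so far
def pvInv (seen : List Int) : Option Int × Option Int → Prop
  | (none, none) => seen = []
  | (none, some _) => False
  | (some a, none) => seen = [a]
  | (some a, some b) => a ≤ b ∧ ∃ rest, seen.Perm (a :: b :: rest) ∧ ∀ x ∈ rest, b ≤ x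

lemma pvInv_step (seen : List Int) (st : Option Int × Option Int) (d : Int)
    (h : pvInv seen st) : pvInv (seen ++ [d]) (pvStep st d) := by
  match st with
  | (none, none) =>
      simp only [pvInv] at h; subst h; simp [pvStep, pvInv]
  | (none, some _) => exact absurd h (by simp [pvInv])
  | (some a, none) =>
      simp only [pvInv] at h; subst h
      by_cases hd : d < a
      · simp only [pvStep, if_pos hd, pvInv]
        exact ⟨le_of_lt hd, [], List.Perm.swap d a [], by simp⟩
      · simp only [pvStep, if_neg hd, pvInv]
        exact ⟨le_of_not_gt hd, [], List.Perm.refl _, by simp⟩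
  | (some a, some b) =>
      obtain ⟨hab, rest, hperm, hrest⟩ := h
      have hbase : (seen ++ [d]).Perm (d :: a :: b :: rest) :=
        (hperm.append_right [d]).trans (List.perm_append_singleton d _)
      by_cases hd : d < a
      · simp only [pvStep, if_pos hd, pvInv]
        refine ⟨le_of_lt hd, b :: rest, hbase, ?_⟩
        intro x hx
        rcases List.mem_cons.mp hx with rfl | hx
        · exact hab
        · exact le_trans hab (hrest x hx)
      · by_cases hdb : d < b
        · simp only [pvStep, if_neg hd, if_pos hdb, pvInv]
          refine ⟨le_of_not_gt hd, b :: rest, hbase.trans (List.Perm.swap a d _), ?_⟩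
          intro x hx
          rcases List.mem_cons.mp hx with rfl | hx
          · exact le_of_lt hdb
          · exact le_trans (le_of_lt hdb) (hrest x hx)
        · simp only [pvStep, if_neg hd, if_neg hdb, pvInv]
          refine ⟨hab, rest ++ [d], ?_, ?_⟩
          · have : (seen ++ [d]).Perm ((a :: b :: rest) ++ [d]) := hperm.append_right [d]
            simpa using this
          · intro x hx
            rcases List.mem_append.mp hx with hx | hx
            · exact hrest x hx
            · simp only [List.mem_singleton] at hx; subst hx; exact le_of_not_gt hdb

lemma pvInv_foldl (l : List Int) (seen : List Int) (st : Option Int × Option Int)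
    (h : pvInv seen st) : pvInv (seen ++ l) (l.foldl pvStep st) := by
  induction l generalizing seen st with
  | nil => simpa using h
  | cons d l ih =>
      have := ih (seen ++ [d]) (pvStep st d) (pvInv_step seen st d h)
      simpa using this

-- pyGetD at a Nat index in range is getElem
lemma pyGetD_nat (xs : List Int) (p : Nat) (hp : p < xs.length) :
    PySem.List.pyGetD xs (p : Int) 0 = xs[p] := by
  rw [PySem.List.pyGetD_eq_getElem xs 0 (by omega) (by exact_mod_cast hp)]
  simp

-- a length-2 sublist of a::b::rest (a ≤ b ≤ every element of rest) has sum ≥ a + b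
lemma pair_sublist_sum (a b u v : Int) (rest : List Int) (hab : a ≤ b)
    (hrest : ∀ x ∈ rest, b ≤ x) (h : [u, v].Sublist (a :: b :: rest)) : a + b ≤ u + v := by
  rcases List.sublist_cons_iff.mp h with h1 | ⟨r, hr, hrs⟩
  · rcases List.sublist_cons_iff.mp h1 with h2 | ⟨r, hr, hrs⟩
    · have hu := hrest u (h2.subset (by simp))
      have hv := hrest v (h2.subset (by simp))
      omega
    · injection hr with hu hr'
      subst hu hr'
      have hv : v ∈ rest := List.singleton_sublist.mp hrs
      have := hrest v hv
      omega
  · injection hr with hu hr'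
    subst hu hr'
    have hv : v ∈ b :: rest := List.singleton_sublist.mp hrs
    rcases List.mem_cons.mp hv with rfl | hv
    · omega
    · have := hrest v hv
      omega

-- a length-2 sublist occurs at two increasing positions
lemma sublist_pair_index (u v : Int) (xs : List Int) (h : [u, v].Sublist xs) :
    ∃ p q : Nat, p < q ∧ xs[p]? = some u ∧ xs[q]? = some v := by
  induction xs with
  | nil => simp at h
  | cons x xs ih =>
      rcases List.sublist_cons_iff.mp h with h1 | ⟨r, hr, hrs⟩
      · obtain ⟨p, q, hpq, hp, hq⟩ := ih h1
        exact ⟨p + 1, q + 1, by omega, by simpa, by simpa⟩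
      · injection hr with hu hr'
        subst hu hr'
        have hv : v ∈ xs := List.singleton_sublist.mp hrs
        obtain ⟨q, hq⟩ := List.mem_iff_getElem?.mp hv
        exact ⟨0, q + 1, by omega, by simp, by simpa⟩

-- two increasing positions give a length-2 sublist
lemma pair_index_sublist (xs : List Int) (p q : Nat) (hpq : p < q) (hq : q < xs.length) :
    [xs[p]'(lt_trans hpq hq), xs[q]].Sublist xs := by
  induction xs generalizing p q with
  | nil => simp at hq
  | cons x xs ih =>
      match p, q with
      | 0, q + 1 =>
          simp only [List.getElem_cons_zero, List.getElem_cons_succ]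
          exact (List.singleton_sublist.mpr (List.getElem_mem _)).cons₂ x
      | p + 1, q + 1 =>
          simp only [List.getElem_cons_succ]
          exact (ih p q (by omega) (by simpa using hq)).cons x

-- the all-pairs condition over sublists of the degree list
lemma subpair_iff_min2 (degs : List Int) (a b : Int) (rest : List Int) (y : Int)
    (hperm : degs.Perm (a :: b :: rest)) (hab : a ≤ b) (hrest : ∀ x ∈ rest, b ≤ x) :
    (∀ u v : Int, [u, v].Sublist degs → y ≤ u + v) ↔ y ≤ a + b := by
  constructor
  · intro h
    have hsp : List.Subperm [a, b] degs :=
      ((List.Sublist.cons₂ a (List.Sublist.cons₂ b (List.nil_sublist rest))).subperm).trans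
        hperm.symm.subperm
    obtain ⟨l, hl, hls⟩ := hsp
    have hlen2 : l.length = 2 := hl.length_eq
    match l, hlen2 with
    | [x, z], _ =>
        have hsum : x + z = a + b := by simpa using hl.sum_eq
        have := h x z hls
        omega
  · intro h u v huv
    have hsp : List.Subperm [u, v] (a :: b :: rest) := huv.subperm.trans hperm.subperm
    obtain ⟨l, hl, hls⟩ := hsp
    have hlen2 : l.length = 2 := hl.length_eq
    match l, hlen2 with
    | [x, z], _ =>
        have hsum : x + z = u + v := by simpa using hl.sum_eq
        have := pair_sublist_sum a b x z rest hab hrest hls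
        omega

-- ===== VERDICT (by name: the statement is the Claim_ definition above) =====
theorem TeoremaOre_spec : Claim_equal_TeoremaOre := by
  intro matriz graus _hdom hpre
  unfold Spec_TeoremaOre
  by_cases h3 : matriz.length < 3
  · unfold TeoremaOre TeoremaOre_alt
    rw [if_pos h3, if_pos h3]
  · have hsq : ∀ row ∈ matriz, row.length = matriz.length := by
      rcases hpre with h | h
      · exact absurd h h3
      · exact h
    have hn3 : 3 ≤ matriz.length := by omega
    have hlen : (pvDegs matriz).length = matriz.length := pvDegs_length matriz
    -- row v1 of a square matrix has length n (for 0 ≤ v1 < n)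
    have hrow : ∀ v1 : Int, 0 ≤ v1 → v1 < (matriz.length : Int) →
        ((PySem.List.pyGetD matriz v1 []).length : Int) = (matriz.length : Int) := by
      intro v1 h0 h1
      rw [PySem.List.pyGetD_eq_getElem matriz [] h0 (by omega)]
      have hmem : matriz[v1.toNat]'(by omega) ∈ matriz := List.getElem_mem _
      rw [hsq _ hmem]
    -- the two smallest degrees, from the fold invariant
    have hinv : pvInv (pvDegs matriz) ((pvDegs matriz).foldl pvStep (none, none)) := by
      simpa using pvInv_foldl (pvDegs matriz) [] (none, none) (by simp [pvInv])
    obtain ⟨a, b, hfold, hab, rest, hperm, hrest⟩ :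
        ∃ a b, (pvDegs matriz).foldl pvStep (none, none) = (some a, some b) ∧ a ≤ b ∧
          ∃ rest, (pvDegs matriz).Perm (a :: b :: rest) ∧ ∀ x ∈ rest, b ≤ x := by
      rcases hfold : (pvDegs matriz).foldl pvStep (none, none) with ⟨m1, m2⟩
      rw [hfold] at hinv
      match m1, m2, hinv with
      | none, none, hinv =>
          exfalso
          have h0 : pvDegs matriz = [] := hinv
          rw [h0] at hlen
          simp at hlen
          omega
      | none, some _, hinv => exact absurd hinv (by simp [pvInv])
      | some a, none, hinv =>
          exfalso
          have h1 : pvDegs matriz = [a] := hinv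
          rw [h1] at hlen
          simp at hlen
          omega
      | some a, some b, hinv =>
          obtain ⟨hab, rest, hperm, hrest⟩ := hinv
          exact ⟨a, b, rfl, hab, rest, hperm, hrest⟩
    -- B's value
    have hB : (TeoremaOre_alt matriz graus = true) ↔ ((matriz.length : Int) ≤ a + b) := by
      unfold TeoremaOre_alt
      rw [if_neg h3]
      have hmap : matriz.foldl (fun st row => pvStep st ((PySem.List.count row 1 : Nat) : Int))
          (none, none) = (pvDegs matriz).foldl pvStep (none, none) := by
        unfold pvDegs; rw [List.foldl_map]
      rw [hmap, hfold]
      simp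
    -- A's value
    have hA : (TeoremaOre matriz graus = true)
        ↔ ∀ v1 : Int, 0 ≤ v1 → v1 < (matriz.length : Int) - 1 →
            ∀ v2 : Int, v1 + 1 ≤ v2 → v2 < ((PySem.List.pyGetD matriz v1 []).length : Int) →
              (matriz.length : Int) ≤ PySem.List.pyGetD (pvDegs matriz) v1 0
                + PySem.List.pyGetD (pvDegs matriz) v2 0 := by
      unfold TeoremaOre
      rw [if_neg h3, calcularGraus_eq, hlen]
      exact ore_loop_iff matriz (matriz.length : Int)
    -- A's Int-indexed pair condition equals the sublist condition on the degree list
    have hcond : (∀ v1 : Int, 0 ≤ v1 → v1 < (matriz.length : Int) - 1 →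
            ∀ v2 : Int, v1 + 1 ≤ v2 → v2 < ((PySem.List.pyGetD matriz v1 []).length : Int) →
              (matriz.length : Int) ≤ PySem.List.pyGetD (pvDegs matriz) v1 0
                + PySem.List.pyGetD (pvDegs matriz) v2 0)
        ↔ (∀ u v : Int, [u, v].Sublist (pvDegs matriz) → (matriz.length : Int) ≤ u + v) := by
      constructor
      · intro h u v huv
        obtain ⟨p, q, hpq, hp, hq⟩ := sublist_pair_index u v (pvDegs matriz) huv
        have hqlen : q < (pvDegs matriz).length := by
          by_contra hc
          rw [List.getElem?_eq_none (by omega)] at hq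
          simp at hq
        have hplen : p < (pvDegs matriz).length := lt_trans hpq hqlen
        have hpv : (pvDegs matriz)[p] = u := by
          rw [List.getElem?_eq_getElem hplen] at hp; exact Option.some.inj hp
        have hqv : (pvDegs matriz)[q] = v := by
          rw [List.getElem?_eq_getElem hqlen] at hq; exact Option.some.inj hq
        have h2 : ((q : Nat) : Int) < ((PySem.List.pyGetD matriz (p : Int) []).length : Int) := by
          rw [hrow (p : Int) (by omega) (by omega)]; omega
        have := h (p : Int) (by omega) (by omega) (q : Int) (by omega) h2
        rwa [pyGetD_nat (pvDegs matriz) p hplen, pyGetD_nat (pvDegs matriz) q hqlen,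
          hpv, hqv] at this
      · intro h v1 h0 h1 v2 h2 h3v
        have hv2N : v2 < (matriz.length : Int) := by
          rw [hrow v1 h0 (by omega)] at h3v; exact h3v
        have hplen : v1.toNat < (pvDegs matriz).length := by omega
        have hqlen : v2.toNat < (pvDegs matriz).length := by omega
        have hsub := pair_index_sublist (pvDegs matriz) v1.toNat v2.toNat (by omega) hqlen
        have hle := h _ _ hsub
        have e1 : PySem.List.pyGetD (pvDegs matriz) v1 0 = (pvDegs matriz)[v1.toNat] := by
          have := pyGetD_nat (pvDegs matriz) v1.toNat hplen
          rwa [Int.toNat_of_nonneg h0] at this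
        have e2 : PySem.List.pyGetD (pvDegs matriz) v2 0 = (pvDegs matriz)[v2.toNat] := by
          have := pyGetD_nat (pvDegs matriz) v2.toNat hqlen
          rwa [Int.toNat_of_nonneg (by omega)] at this
        rw [e1, e2]
        exact hle
    rw [Bool.eq_iff_iff, hA, hB, hcond]
    exact subpair_iff_min2 (pvDegs matriz) a b rest (matriz.length : Int) hperm hab hrest
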